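-- pv_equiv track=rewrite | github.com/Tanmayshah89/P2P_secure_msg_platform | secure.py | des_encrypt
-- ===== SOURCE A (Python) =====
-- def pad_text(text):
--     """
--     Pads the input text to make its length a multiple of 8 (DES block size).
--     """
--     pad_len = 8 - (len(text) % 8)
--     return text + chr(pad_len) * pad_len
--
-- def xor_block(block, key_block):
--     """
--     XORs a block of text with a block of key.
--     """
--     return ''.join(chr(ord(b) ^ ord(k)) for b, k in zip(block, key_block))
--
-- def des_encrypt(plaintext, key):
--     """
--     Encrypts plaintext using simplified DES-like method with XOR and padding.
--     """
--     plaintext = pad_text(plaintext)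
--     ciphertext = ''
--     for i in range(0, len(plaintext), 8):
--         block = plaintext[i:i+8]
--         key_block = (key * 8)[:8]  # Repeat key to 8 bytes if needed
--         ciphertext += xor_block(block, key_block)
--     return ciphertext
-- ===== SOURCE B (Python) =====
-- def des_encrypt(plaintext, key):
--     pad_len = 8 - (len(plaintext) % 8)
--     padded = plaintext + chr(pad_len) * pad_len
--     key_block = (key * 8)[:8]
--     if not key_block:
--         return ''
--     return ''.join(chr(ord(ch) ^ ord(key_block[i % 8])) for i, ch in enumerate(padded))
-- ===== Notes on version B (the rewrite author's own statement) =====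
-- stated objective: faster
-- what changed: Replaces the outer block loop (with its per-iteration key-block rebuild, slicing and repeated string concatenation) by one flat enumerate pass over the padded text XORing each character with key_block[i % 8], joined once.
import Mathlib
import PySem

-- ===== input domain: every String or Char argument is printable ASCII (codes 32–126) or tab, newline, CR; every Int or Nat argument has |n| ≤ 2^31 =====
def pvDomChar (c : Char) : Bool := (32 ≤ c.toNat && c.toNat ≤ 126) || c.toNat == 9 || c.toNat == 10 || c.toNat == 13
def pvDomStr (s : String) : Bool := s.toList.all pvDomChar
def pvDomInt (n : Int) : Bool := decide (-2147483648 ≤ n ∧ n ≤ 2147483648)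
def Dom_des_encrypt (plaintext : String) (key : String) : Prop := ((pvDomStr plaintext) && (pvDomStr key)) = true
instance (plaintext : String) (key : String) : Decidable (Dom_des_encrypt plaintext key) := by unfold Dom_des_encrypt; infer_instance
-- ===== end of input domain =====

-- B replaces A's outer 8-byte-block loop (per-block key rebuild, slicing, repeated string
-- concatenation) by one flat enumerate pass XORing each character with key_block[i % 8] (objective: faster).


-- ===== PORT A =====
-- pad_text: text + chr(pad_len) * pad_len with pad_len = 8 - len(text) % 8
def pvPadText (text : List Char) : List Char :=
  let padLen := 8 - text.length % 8
  text ++ List.replicate padLen (Char.ofNat padLen)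

-- xor_block: ''.join(chr(ord(b) ^ ord(k)) for b, k in zip(block, key_block))
def pvXorBlock (block keyBlock : List Char) : List Char :=
  (block.zip keyBlock).map (fun bk => Char.ofNat (bk.1.toNat ^^^ bk.2.toNat))

def des_encrypt (plaintext : String) (key : String) : String :=
  let p := pvPadText plaintext.toList
  String.ofList ((PySem.List.pyRange 0 p.length 8).foldl
    (fun acc i =>
      acc ++ pvXorBlock (PySem.List.slice p (some i) (some (i + 8)))
        (((List.replicate 8 key.toList).flatten).take 8)) [])

-- ===== PORT B =====
def des_encrypt_alt (plaintext : String) (key : String) : String :=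
  let padLen := 8 - plaintext.toList.length % 8
  let padded := plaintext.toList ++ List.replicate padLen (Char.ofNat padLen)
  let keyBlock := ((List.replicate 8 key.toList).flatten).take 8
  if keyBlock.isEmpty then ""
  else
    -- key_block[i % 8]: the index is always in range (0 ≤ i % 8 < 8 = len), so pyGetD's default is never used
    String.ofList ((PySem.List.enumerate padded).map
      (fun ic => Char.ofNat (ic.2.toNat ^^^ (PySem.List.pyGetD keyBlock (PySem.Int.mod ic.1 8) 'A').toNat)))

-- ===== PRECONDITION & SPEC =====
def Spec_des_encrypt (plaintext : String) (key : String) (out : String) : Prop := out = des_encrypt_alt plaintext key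
instance (plaintext : String) (key : String) (out : String) : Decidable (Spec_des_encrypt plaintext key out) := by unfold Spec_des_encrypt; infer_instance

-- ===== CLAIM (what is proved, stated in full; the proofs are below) =====
def Claim_equal_des_encrypt : Prop := ∀ (plaintext : String) (key : String), Dom_des_encrypt plaintext key → Spec_des_encrypt plaintext key (des_encrypt plaintext key)

-- ===== LEMMAS AND PROOFS =====

-- reference chunked encryption: XOR the first 8 chars with kb, recurse on the rest
def pvChunkEnc (kb : List Char) (p : List Char) : List Char :=
  if p = [] then [] else pvXorBlock (p.take 8) kb ++ pvChunkEnc kb (p.drop 8)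
termination_by p.length
decreasing_by
  simp only [List.length_drop]
  have : p.length ≠ 0 := by simpa [List.length_eq_zero_iff] using ‹¬ p = []›
  omega

theorem pad_len_mod (t : List Char) : (pvPadText t).length % 8 = 0 ∧ 0 < (pvPadText t).length := by
  simp only [pvPadText, List.length_append, List.length_replicate]
  omega

theorem foldl_nil_app {α : Type} (l : List α) (acc : List Char) :
    l.foldl (fun acc (_ : α) => acc ++ ([] : List Char)) acc = acc := by
  induction l generalizing acc with
  | nil => rfl
  | cons x xs ih => simpa using ih acc

theorem pyRange8 (n : Nat) :
    PySem.List.pyRange 0 (8 * n) 8 = (List.range n).map (fun k : Nat => ((8 : Int) * (k : Int))) := by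
  rw [PySem.List.pyRange_of_pos _ _ (by norm_num)]
  rcases Nat.eq_zero_or_pos n with h | h
  · subst h; simp
  · have hlt : (0 : Int) < 8 * n := by positivity
    rw [if_pos hlt]
    have : ((8 * (n : Int) - 0 + 8 - 1) / 8).toNat = n := by
      have : (8 * (n : Int) - 0 + 8 - 1) / 8 = n := by omega
      rw [this]; exact Int.toNat_natCast n
    rw [this]
    simp only [zero_add]

theorem foldA (kb : List Char) : ∀ (n : Nat) (p : List Char) (acc : List Char),
    p.length = 8 * n →
    (List.range n).foldl (fun acc k => acc ++ pvXorBlock ((p.drop (8 * k)).take 8) kb) acc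
      = acc ++ pvChunkEnc kb p := by
  intro n
  induction n with
  | zero =>
    intro p acc hp
    have : p = [] := by simpa using List.length_eq_zero_iff.mp hp
    subst this
    simp [pvChunkEnc]
  | succ n ih =>
    intro p acc hp
    have hne : p ≠ [] := by
      intro h; subst h; simp only [List.length_nil] at hp; omega
    rw [List.range_succ_eq_map]
    simp only [List.foldl_cons, List.foldl_map, Nat.mul_zero, List.drop_zero]
    have hdrop : ∀ k : Nat, p.drop (8 * (k + 1)) = (p.drop 8).drop (8 * k) := by
      intro k; rw [List.drop_drop]; ring_nf
    have hstep :
        (List.range n).foldl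
          (fun acc k => acc ++ pvXorBlock ((p.drop (8 * (k + 1))).take 8) kb)
          (acc ++ pvXorBlock (p.take 8) kb)
        = (List.range n).foldl
          (fun acc k => acc ++ pvXorBlock (((p.drop 8).drop (8 * k)).take 8) kb)
          (acc ++ pvXorBlock (p.take 8) kb) := by
      apply PySem.List.foldl_congr_mem
      intro a b _; rw [hdrop b]
    rw [hstep, ih (p.drop 8) _ (by simp only [List.length_drop, hp]; omega)]
    conv_rhs => rw [pvChunkEnc]
    rw [if_neg hne, List.append_assoc]

theorem block8 (kb : List Char) (hkb : kb.length = 8) (s : Int)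
    (q : List Char) (hq : q.length = 8) :
    (PySem.List.enumerate q (8 * s)).map
      (fun ic => Char.ofNat (ic.2.toNat ^^^ (PySem.List.pyGetD kb (PySem.Int.mod ic.1 8) 'A').toNat))
      = pvXorBlock q kb := by
  apply List.ext_getElem
  · simp [PySem.List.length_enumerate, pvXorBlock, hq, hkb]
  · intro k h1 h2
    have hk : k < 8 := by simpa [PySem.List.length_enumerate, hq] using h1
    simp only [List.getElem_map, PySem.List.getElem_enumerate, pvXorBlock,
      List.getElem_zip]
    have hmod : PySem.Int.mod (8 * s + k) 8 = k := by
      simp only [PySem.Int.mod, Int.fmod_eq_emod]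
      norm_num
      omega
    rw [hmod, PySem.List.pyGetD_eq_getElem kb 'A' (by positivity)
      (by rw [hkb]; exact_mod_cast hk)]
    simp

theorem foldB (kb : List Char) (hkb : kb.length = 8) : ∀ (n : Nat) (p : List Char) (s : Nat),
    p.length = 8 * n →
    (PySem.List.enumerate p (8 * s)).map
      (fun ic => Char.ofNat (ic.2.toNat ^^^ (PySem.List.pyGetD kb (PySem.Int.mod ic.1 8) 'A').toNat))
      = pvChunkEnc kb p := by
  intro n
  induction n with
  | zero =>
    intro p s hp
    have : p = [] := by simpa [List.length_eq_zero_iff] using hp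
    subst this
    simp [pvChunkEnc, PySem.List.enumerate_nil]
  | succ n ih =>
    intro p s hp
    have hne : p ≠ [] := by
      intro h; subst h; simp only [List.length_nil] at hp; omega
    have htk : (p.take 8).length = 8 := by
      simp only [List.length_take, hp]; omega
    conv_lhs => rw [← List.take_append_drop 8 p]
    rw [PySem.List.enumerate_append, List.map_append, htk]
    have h8 : (8 * (s : Int) + (8 : Nat)) = 8 * ((s : Int) + 1) := by push_cast; ring
    rw [h8]
    have : ((s : Int) + 1) = ((s + 1 : Nat) : Int) := by push_cast; ring
    rw [this, ih (p.drop 8) (s + 1) (by simp only [List.length_drop, hp]; omega)]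
    rw [block8 kb hkb (s : Int) (p.take 8) htk]
    conv_rhs => rw [pvChunkEnc]
    rw [if_neg hne]

theorem kb_len (key : String) (hk : key.toList ≠ []) :
    (((List.replicate 8 key.toList).flatten).take 8).length = 8 := by
  have hpos : 0 < key.toList.length := List.length_pos_iff.mpr hk
  simp only [List.length_take, List.length_flatten, List.map_replicate,
    List.sum_replicate, smul_eq_mul] at *
  omega

-- ===== VERDICT (by name: the statement is the Claim_ definition above) =====
theorem des_encrypt_spec : Claim_equal_des_encrypt := by
  intro plaintext key _
  unfold Spec_des_encrypt des_encrypt des_encrypt_alt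
  simp only []
  set kb := ((List.replicate 8 key.toList).flatten).take 8 with hkbdef
  set p := pvPadText plaintext.toList with hpdef
  have hp' : (plaintext.toList ++ List.replicate (8 - plaintext.toList.length % 8)
      (Char.ofNat (8 - plaintext.toList.length % 8))) = p := by
    rw [hpdef]; rfl
  rw [hp']
  by_cases hkey : key.toList = []
  · have hkb : kb = [] := by rw [hkbdef, hkey]; simp
    rw [hkb]
    have hx : ∀ b : List Char, pvXorBlock b [] = [] := by intro b; simp [pvXorBlock]
    simp only [hx, List.isEmpty_nil, if_pos, foldl_nil_app]
  · have hkb : kb.length = 8 := kb_len key hkey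
    have hkbne : kb.isEmpty = false := by
      rw [List.isEmpty_eq_false_iff]; intro h; rw [h] at hkb; simp at hkb
    rw [hkbne]
    simp only [Bool.false_eq_true, if_false]
    obtain ⟨hm, hpos⟩ := pad_len_mod plaintext.toList
    rw [← hpdef] at hm hpos
    set n := p.length / 8 with hn
    have hlen : p.length = 8 * n := by omega
    have hcast : (p.length : Int) = 8 * (n : Nat) := by exact_mod_cast hlen
    rw [hcast, pyRange8, List.foldl_map]
    have hslice : ∀ k : Nat,
        PySem.List.slice p (some (8 * (k : Int))) (some (8 * (k : Int) + 8))
          = (p.drop (8 * k)).take 8 := by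
      intro k
      have h1 : (8 * (k : Int)) = ((8 * k : Nat) : Int) := by push_cast; ring
      have h2 : (8 * (k : Int) + 8) = ((8 * k : Nat) : Int) + ((8 : Nat) : Int) := by
        push_cast; ring
      rw [h2, h1, PySem.List.slice_natCast_add]
    rw [PySem.List.foldl_congr_mem (List.range n)
      (fun (acc : List Char) (k : Nat) =>
        acc ++ pvXorBlock (PySem.List.slice p (some ((8 : Int) * (k : Int))) (some ((8 : Int) * (k : Int) + 8))) kb)
      (fun (acc : List Char) (k : Nat) =>
        acc ++ pvXorBlock ((p.drop (8 * k)).take 8) kb) []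
      (fun acc x _ => by simp only [hslice x])]
    rw [foldA kb n p [] hlen]
    have hB := foldB kb hkb n p 0 hlen
    simp only [Nat.cast_zero, mul_zero] at hB
    rw [hB]
    rfl
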